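-- pv_equiv track=rewrite | github.com/yoyochen088/telegram-bot | calculator.py | get_higher_titles
-- ===== SOURCE A (Python) =====
-- TITLE_THRESHOLDS: list[tuple[int, str]] = [
--     (0,    "無稱號"),
--     (500,  "青銅花匠"),
--     (700,  "白銀花匠"),
--     (1000, "黃金花匠"),
--     (1300, "大師花匠"),
--     (1400, "王者花匠"),
-- ]
--
-- def get_higher_titles(score: int) -> list[tuple[int, str, int]]:
--     """回傳所有比目前稱號更高的 (門檻分數, 稱號, 差距) 清單（升序）。"""
--     current_threshold = 0
--     for threshold, _ in TITLE_THRESHOLDS: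
--         if score >= threshold:
--             current_threshold = threshold
--     return [
--         (threshold, name, threshold - score)
--         for threshold, name in TITLE_THRESHOLDS
--         if threshold > current_threshold
--     ]
-- ===== SOURCE B (Python) =====
-- TITLE_THRESHOLDS: list[tuple[int, str]] = [
--     (0,    "無稱號"),
--     (500,  "青銅花匠"),
--     (700,  "白銀花匠"),
--     (1000, "黃金花匠"),
--     (1300, "大師花匠"),
--     (1400, "王者花匠"),
-- ]
--
-- def get_higher_titles(score: int) -> list[tuple[int, str, int]]:
--     # The current threshold A finds is the largest threshold <= score (0 if score < 0),
--     # so filtering "threshold > current" is the same as "threshold > max(score, 0)".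
--     cutoff = max(score, 0)
--     return [(t, name, t - score) for t, name in TITLE_THRESHOLDS if t > cutoff]
-- ===== Notes on version B (the rewrite author's own statement) =====
-- stated objective: simpler
-- what changed: Replaces A's two-pass find-current-threshold loop then filter with a single comprehension filtering on cutoff = max(score, 0), which equals A's computed current threshold for filtering purposes.
import Mathlib
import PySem

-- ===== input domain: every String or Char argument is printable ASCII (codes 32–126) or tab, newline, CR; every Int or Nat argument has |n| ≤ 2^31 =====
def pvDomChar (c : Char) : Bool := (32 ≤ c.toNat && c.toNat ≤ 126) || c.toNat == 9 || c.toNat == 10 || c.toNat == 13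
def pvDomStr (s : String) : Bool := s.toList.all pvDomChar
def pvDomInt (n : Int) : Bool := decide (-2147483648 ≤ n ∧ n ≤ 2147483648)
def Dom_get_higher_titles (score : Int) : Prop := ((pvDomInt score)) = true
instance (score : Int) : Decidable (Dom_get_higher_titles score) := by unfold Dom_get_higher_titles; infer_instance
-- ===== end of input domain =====

-- B replaces A's two-pass find-current-threshold-then-filter with a single pass filtering on cutoff = max(score, 0); objective: simpler.


-- ===== PORT A =====
def titleThresholds : List (Int × String) :=
  [(0, "無稱號"), (500, "青銅花匠"), (700, "白銀花匠"),
   (1000, "黃金花匠"), (1300, "大師花匠"), (1400, "王者花匠")]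

-- A: loop finding the largest threshold ≤ score, then a filtered comprehension.
def pvCurrent (score : Int) : Int :=
  titleThresholds.foldl (fun acc p => if score ≥ p.1 then p.1 else acc) 0

def get_higher_titles (score : Int) : List (Int × String × Int) :=
  (titleThresholds.filter (fun p => p.1 > pvCurrent score)).map
    (fun p => (p.1, p.2, p.1 - score))

-- ===== PORT B =====
-- B: single comprehension with cutoff = max(score, 0); simpler decomposition.
def get_higher_titles_alt (score : Int) : List (Int × String × Int) :=
  titleThresholds.filterMap
    (fun p => if p.1 > max score 0 then some (p.1, p.2, p.1 - score) else none)

-- ===== PRECONDITION & SPEC =====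
def Spec_get_higher_titles (score : Int) (out : List (Int × String × Int)) : Prop := out = get_higher_titles_alt score
instance (score : Int) (out : List (Int × String × Int)) : Decidable (Spec_get_higher_titles score out) := by unfold Spec_get_higher_titles; infer_instance

-- ===== CLAIM (what is proved, stated in full; the proofs are below) =====
def Claim_equal_get_higher_titles : Prop := ∀ (score : Int), Dom_get_higher_titles score → Spec_get_higher_titles score (get_higher_titles score)

-- ===== LEMMAS AND PROOFS =====

-- ===== VERDICT (by name: the statement is the Claim_ definition above) =====
theorem get_higher_titles_spec : Claim_equal_get_higher_titles := by
  intro score _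
  unfold Spec_get_higher_titles
  have h : score < 0 ∨ (0 ≤ score ∧ score < 500) ∨ (500 ≤ score ∧ score < 700) ∨ (700 ≤ score ∧ score < 1000) ∨ (1000 ≤ score ∧ score < 1300) ∨ (1300 ≤ score ∧ score < 1400) ∨ (1400 ≤ score) := by omega
  rcases h with h|h|h|h|h|h|h
  · have hc : pvCurrent score = 0 := by
      unfold pvCurrent titleThresholds
      simp only [List.foldl]
      split_ifs <;> omega
    simp [get_higher_titles, get_higher_titles_alt, titleThresholds, hc,
      List.filter, List.filterMap,
      (by omega : max score 0 = (0:Int))]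
  · have hc : pvCurrent score = 0 := by
      unfold pvCurrent titleThresholds
      simp only [List.foldl]
      split_ifs <;> omega
    simp [get_higher_titles, get_higher_titles_alt, titleThresholds, hc,
      List.filter, List.filterMap,
      (by omega : max score 0 = score),
      eq_false (by omega : ¬ score < (0:Int)),
      (by omega : (500:Int) > score),
      (by omega : (700:Int) > score),
      (by omega : (1000:Int) > score),
      (by omega : (1300:Int) > score),
      (by omega : (1400:Int) > score)]
  · have hc : pvCurrent score = 500 := by
      unfold pvCurrent titleThresholds
      simp only [List.foldl]
      split_ifs <;> omega
    simp [get_higher_titles, get_higher_titles_alt, titleThresholds, hc,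
      List.filter, List.filterMap,
      (by omega : max score 0 = score),
      eq_false (by omega : ¬ score < (0:Int)),
      eq_false (by omega : ¬ score < (500:Int)),
      (by omega : (700:Int) > score),
      (by omega : (1000:Int) > score),
      (by omega : (1300:Int) > score),
      (by omega : (1400:Int) > score)]
  · have hc : pvCurrent score = 700 := by
      unfold pvCurrent titleThresholds
      simp only [List.foldl]
      split_ifs <;> omega
    simp [get_higher_titles, get_higher_titles_alt, titleThresholds, hc,
      List.filter, List.filterMap,
      (by omega : max score 0 = score),
      eq_false (by omega : ¬ score < (0:Int)),
      eq_false (by omega : ¬ score < (500:Int)),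
      eq_false (by omega : ¬ score < (700:Int)),
      (by omega : (1000:Int) > score),
      (by omega : (1300:Int) > score),
      (by omega : (1400:Int) > score)]
  · have hc : pvCurrent score = 1000 := by
      unfold pvCurrent titleThresholds
      simp only [List.foldl]
      split_ifs <;> omega
    simp [get_higher_titles, get_higher_titles_alt, titleThresholds, hc,
      List.filter, List.filterMap,
      (by omega : max score 0 = score),
      eq_false (by omega : ¬ score < (0:Int)),
      eq_false (by omega : ¬ score < (500:Int)),
      eq_false (by omega : ¬ score < (700:Int)),
      eq_false (by omega : ¬ score < (1000:Int)),
      (by omega : (1300:Int) > score),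
      (by omega : (1400:Int) > score)]
  · have hc : pvCurrent score = 1300 := by
      unfold pvCurrent titleThresholds
      simp only [List.foldl]
      split_ifs <;> omega
    simp [get_higher_titles, get_higher_titles_alt, titleThresholds, hc,
      List.filter, List.filterMap,
      (by omega : max score 0 = score),
      eq_false (by omega : ¬ score < (0:Int)),
      eq_false (by omega : ¬ score < (500:Int)),
      eq_false (by omega : ¬ score < (700:Int)),
      eq_false (by omega : ¬ score < (1000:Int)),
      eq_false (by omega : ¬ score < (1300:Int)),
      (by omega : (1400:Int) > score)]
  · have hc : pvCurrent score = 1400 := by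
      unfold pvCurrent titleThresholds
      simp only [List.foldl]
      split_ifs <;> omega
    simp [get_higher_titles, get_higher_titles_alt, titleThresholds, hc,
      List.filter, List.filterMap,
      (by omega : max score 0 = score),
      eq_false (by omega : ¬ score < (0:Int)),
      eq_false (by omega : ¬ score < (500:Int)),
      eq_false (by omega : ¬ score < (700:Int)),
      eq_false (by omega : ¬ score < (1000:Int)),
      eq_false (by omega : ¬ score < (1300:Int)),
      eq_false (by omega : ¬ score < (1400:Int))]
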